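-- pv_equiv track=rewrite | github.com/BrewHubPHL/ai-debate | debate.py | create_vertical_rage
-- ===== SOURCE A (Python) =====
-- def create_vertical_rage(anger, color):
--     """Create a vertical rage meter (8 rows tall)"""
--     filled = anger // 12  # 0-8 blocks for 0-100 anger
--     bars = []
--     for i in range(8):
--         row_num = 7 - i  # Start from bottom
--         if row_num < filled:
--             bars.append(f"[{color}]█[/]")
--         else:
--             bars.append(f"[dim]░[/]")
--     return bars
-- ===== SOURCE B (Python) =====
-- def create_vertical_rage(anger, color):
--     """Create a vertical rage meter (8 rows tall)"""
--     def build(rows, a):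
--         # peel one filled bottom row per full 12 points of anger; no division
--         if rows == 0:
--             return []
--         if a >= 12:
--             return build(rows - 1, a - 12) + [f"[{color}]\u2588[/]"]
--         return ["[dim]\u2591[/]"] * rows
--     return build(8, anger)
-- ===== Notes on version B (the rewrite author's own statement) =====
-- stated objective: alternative
-- what changed: Replaces the fixed 8-iteration loop that divides anger by 12 and tests each row against the quotient with a division-free recursion that repeatedly subtracts 12, appending one filled bottom row per subtraction and emitting all remaining rows as dim in one step.
import Mathlib
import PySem

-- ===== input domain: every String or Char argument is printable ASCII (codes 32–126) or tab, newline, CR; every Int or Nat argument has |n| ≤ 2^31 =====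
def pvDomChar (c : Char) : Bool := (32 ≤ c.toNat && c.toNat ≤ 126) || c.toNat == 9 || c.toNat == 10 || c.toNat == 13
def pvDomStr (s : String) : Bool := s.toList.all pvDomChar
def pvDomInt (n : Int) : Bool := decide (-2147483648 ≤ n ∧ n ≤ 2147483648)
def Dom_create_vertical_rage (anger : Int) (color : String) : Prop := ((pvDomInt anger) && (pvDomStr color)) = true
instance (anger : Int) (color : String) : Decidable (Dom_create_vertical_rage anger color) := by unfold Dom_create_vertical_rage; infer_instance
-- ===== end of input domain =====

-- B replaces the 8-row loop over anger//12 by a division-free recursion that subtracts 12 per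
-- filled bottom row and emits the remaining rows as dim at once (alternative decomposition).


-- ===== PORT A =====
def create_vertical_rage (anger : Int) (color : String) : List String :=
  let filled := PySem.Int.floordiv anger 12
  (PySem.List.pyRange 0 8 1).foldl (fun bars i =>
    let row_num := 7 - i
    if row_num < filled then bars ++ ["[" ++ color ++ "]█[/]"]
    else bars ++ ["[dim]░[/]"]) []

-- ===== PORT B =====
def rageBuild (rows : Nat) (a : Int) (color : String) : List String :=
  match rows with
  | 0 => []
  | r + 1 =>
    if a ≥ 12 then rageBuild r (a - 12) color ++ ["[" ++ color ++ "]█[/]"]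
    else List.replicate (r + 1) "[dim]░[/]"

def create_vertical_rage_alt (anger : Int) (color : String) : List String :=
  rageBuild 8 anger color

-- ===== PRECONDITION & SPEC =====
def Spec_create_vertical_rage (anger : Int) (color : String) (out : List String) : Prop := out = create_vertical_rage_alt anger color
instance (anger : Int) (color : String) (out : List String) : Decidable (Spec_create_vertical_rage anger color out) := by unfold Spec_create_vertical_rage; infer_instance

-- ===== CLAIM (what is proved, stated in full; the proofs are below) =====
def Claim_equal_create_vertical_rage : Prop := ∀ (anger : Int) (color : String), Dom_create_vertical_rage anger color → Spec_create_vertical_rage anger color (create_vertical_rage anger color)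

-- ===== LEMMAS AND PROOFS =====

lemma pyRange8 : PySem.List.pyRange 0 8 1 = [(0 : Int),1,2,3,4,5,6,7] := by decide

-- A's foldl, with the division result d abstracted, equals the clamped replicate normal form
lemma rage_key (d : Int) (color : String) :
    ([(0 : Int),1,2,3,4,5,6,7]).foldl (fun bars i =>
      if 7 - i < d then bars ++ ["[" ++ color ++ "]█[/]"]
      else bars ++ ["[dim]░[/]"]) []
    = List.replicate (8 - max 0 (min d 8)).toNat "[dim]░[/]" ++
        List.replicate (max 0 (min d 8)).toNat ("[" ++ color ++ "]█[/]") := by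
  obtain ⟨k, hk8, hf⟩ : ∃ k : ℕ, k ≤ 8 ∧ max 0 (min d 8) = (k : Int) :=
    ⟨(max 0 (min d 8)).toNat, by omega, by omega⟩
  rw [hf]
  simp only [List.foldl_cons, List.foldl_nil]
  interval_cases k
  · rw [if_neg (show ¬(7 - (0:Int) < d) by omega), if_neg (show ¬(7 - (1:Int) < d) by omega),
       if_neg (show ¬(7 - (2:Int) < d) by omega), if_neg (show ¬(7 - (3:Int) < d) by omega),
       if_neg (show ¬(7 - (4:Int) < d) by omega), if_neg (show ¬(7 - (5:Int) < d) by omega),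
       if_neg (show ¬(7 - (6:Int) < d) by omega), if_neg (show ¬(7 - (7:Int) < d) by omega)]
    rfl
  · have : d = 1 := by omega
    subst this; rfl
  · have : d = 2 := by omega
    subst this; rfl
  · have : d = 3 := by omega
    subst this; rfl
  · have : d = 4 := by omega
    subst this; rfl
  · have : d = 5 := by omega
    subst this; rfl
  · have : d = 6 := by omega
    subst this; rfl
  · have : d = 7 := by omega
    subst this; rfl
  · rw [if_pos (show (7 - (0:Int) < d) by omega), if_pos (show (7 - (1:Int) < d) by omega),
       if_pos (show (7 - (2:Int) < d) by omega), if_pos (show (7 - (3:Int) < d) by omega),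
       if_pos (show (7 - (4:Int) < d) by omega), if_pos (show (7 - (5:Int) < d) by omega),
       if_pos (show (7 - (6:Int) < d) by omega), if_pos (show (7 - (7:Int) < d) by omega)]
    rfl

-- B's recursion equals the same replicate normal form, stated via the floor-division brackets
lemma rageBuild_eq (anger : Int) (color : String) :
    rageBuild 8 anger color
    = List.replicate (8 - max 0 (min (PySem.Int.floordiv anger 12) 8)).toNat "[dim]░[/]" ++
        List.replicate (max 0 (min (PySem.Int.floordiv anger 12) 8)).toNat ("[" ++ color ++ "]█[/]") := by
  set d := PySem.Int.floordiv anger 12 with hd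
  have hbr : d * 12 ≤ anger ∧ anger < (d + 1) * 12 :=
    (PySem.Int.floordiv_eq_iff_of_pos (by omega)).mp hd.symm
  obtain ⟨k, hk8, hf⟩ : ∃ k : ℕ, k ≤ 8 ∧ max 0 (min d 8) = (k : Int) :=
    ⟨(max 0 (min d 8)).toNat, by omega, by omega⟩
  rw [hf]
  simp only [rageBuild]
  interval_cases k
  · rw [if_neg (show ¬(anger ≥ 12) by omega)]
    rfl
  · rw [if_pos (show anger ≥ 12 by omega), if_neg (show ¬(anger - 12 ≥ 12) by omega)]
    rfl
  · rw [if_pos (show anger ≥ 12 by omega), if_pos (show anger - 12 ≥ 12 by omega),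
       if_neg (show ¬(anger - 12 - 12 ≥ 12) by omega)]
    rfl
  · rw [if_pos (show anger ≥ 12 by omega), if_pos (show anger - 12 ≥ 12 by omega),
       if_pos (show anger - 12 - 12 ≥ 12 by omega), if_neg (show ¬(anger - 12 - 12 - 12 ≥ 12) by omega)]
    rfl
  · rw [if_pos (show anger ≥ 12 by omega), if_pos (show anger - 12 ≥ 12 by omega),
       if_pos (show anger - 12 - 12 ≥ 12 by omega), if_pos (show anger - 12 - 12 - 12 ≥ 12 by omega),
       if_neg (show ¬(anger - 12 - 12 - 12 - 12 ≥ 12) by omega)]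
    rfl
  · rw [if_pos (show anger ≥ 12 by omega), if_pos (show anger - 12 ≥ 12 by omega),
       if_pos (show anger - 12 - 12 ≥ 12 by omega), if_pos (show anger - 12 - 12 - 12 ≥ 12 by omega),
       if_pos (show anger - 12 - 12 - 12 - 12 ≥ 12 by omega),
       if_neg (show ¬(anger - 12 - 12 - 12 - 12 - 12 ≥ 12) by omega)]
    rfl
  · rw [if_pos (show anger ≥ 12 by omega), if_pos (show anger - 12 ≥ 12 by omega),
       if_pos (show anger - 12 - 12 ≥ 12 by omega), if_pos (show anger - 12 - 12 - 12 ≥ 12 by omega),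
       if_pos (show anger - 12 - 12 - 12 - 12 ≥ 12 by omega),
       if_pos (show anger - 12 - 12 - 12 - 12 - 12 ≥ 12 by omega),
       if_neg (show ¬(anger - 12 - 12 - 12 - 12 - 12 - 12 ≥ 12) by omega)]
    rfl
  · rw [if_pos (show anger ≥ 12 by omega), if_pos (show anger - 12 ≥ 12 by omega),
       if_pos (show anger - 12 - 12 ≥ 12 by omega), if_pos (show anger - 12 - 12 - 12 ≥ 12 by omega),
       if_pos (show anger - 12 - 12 - 12 - 12 ≥ 12 by omega),
       if_pos (show anger - 12 - 12 - 12 - 12 - 12 ≥ 12 by omega),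
       if_pos (show anger - 12 - 12 - 12 - 12 - 12 - 12 ≥ 12 by omega),
       if_neg (show ¬(anger - 12 - 12 - 12 - 12 - 12 - 12 - 12 ≥ 12) by omega)]
    rfl
  · rw [if_pos (show anger ≥ 12 by omega), if_pos (show anger - 12 ≥ 12 by omega),
       if_pos (show anger - 12 - 12 ≥ 12 by omega), if_pos (show anger - 12 - 12 - 12 ≥ 12 by omega),
       if_pos (show anger - 12 - 12 - 12 - 12 ≥ 12 by omega),
       if_pos (show anger - 12 - 12 - 12 - 12 - 12 ≥ 12 by omega),
       if_pos (show anger - 12 - 12 - 12 - 12 - 12 - 12 ≥ 12 by omega),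
       if_pos (show anger - 12 - 12 - 12 - 12 - 12 - 12 - 12 ≥ 12 by omega)]
    rfl

-- ===== VERDICT (by name: the statement is the Claim_ definition above) =====
theorem create_vertical_rage_spec : Claim_equal_create_vertical_rage := by
  intro anger color _
  unfold Spec_create_vertical_rage create_vertical_rage create_vertical_rage_alt
  rw [pyRange8, rage_key, rageBuild_eq]
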